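-- pv_equiv track=rewrite | github.com/ireaml/compchem_toolkit | quantum_espresso_toolkit/ase_espresso.py | get_indexes
-- ===== SOURCE A (Python) =====
-- _PW_START = 'Program PWSCF'
--
-- _PW_END = 'End of self-consistent calculation'
--
-- _PW_CELL = 'CELL_PARAMETERS'
--
-- _PW_POS = 'ATOMIC_POSITIONS'
--
-- _PW_MAGMOM = 'Magnetic moment per site'
--
-- _PW_FORCE = 'Forces acting on atoms'
--
-- _PW_TOTEN = '!    total energy'
--
-- _PW_STRESS = 'total   stress'
--
-- _PW_FERMI = 'the Fermi energy is'
--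
-- _PW_HIGHEST_OCCUPIED = 'highest occupied level'
--
-- _PW_HIGHEST_OCCUPIED_LOWEST_FREE = 'highest occupied, lowest unoccupied level'
--
-- _PW_KPTS = 'number of k points='
--
-- _PW_BANDS = _PW_END
--
-- _PW_BANDSTRUCTURE = 'End of band structure calculation'
--
-- def get_indexes(
--     pwo_lines,
-- ) -> dict:
--     """
--     Parse Quantum Espresso output file and return a dictionary with the indexes
--     of the lines where the different information is printed.
--     Adapted from ase.io.espresso.
--
--     Args:
--         pwo_lines (list):
--             list of lines from Quantum Espresso output file
--
--     Returns:
--         dict: dict mapping section identifier to index of line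
--     """
--     indexes = {
--         _PW_START: [],
--         _PW_END: [],
--         _PW_CELL: [],
--         _PW_POS: [],
--         _PW_MAGMOM: [],
--         _PW_FORCE: [],
--         _PW_TOTEN: [],
--         _PW_STRESS: [],
--         _PW_FERMI: [],
--         _PW_HIGHEST_OCCUPIED: [],
--         _PW_HIGHEST_OCCUPIED_LOWEST_FREE: [],
--         _PW_KPTS: [],
--         _PW_BANDS: [],
--         _PW_BANDSTRUCTURE: [],
--     }
--     for idx, line in enumerate(pwo_lines):
--         for identifier in indexes:
--             if identifier in line:
--                 indexes[identifier].append(idx)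
--     return indexes
-- ===== SOURCE B (Python) =====
-- _PW_START = 'Program PWSCF'
-- _PW_END = 'End of self-consistent calculation'
-- _PW_CELL = 'CELL_PARAMETERS'
-- _PW_POS = 'ATOMIC_POSITIONS'
-- _PW_MAGMOM = 'Magnetic moment per site'
-- _PW_FORCE = 'Forces acting on atoms'
-- _PW_TOTEN = '!    total energy'
-- _PW_STRESS = 'total   stress'
-- _PW_FERMI = 'the Fermi energy is'
-- _PW_HIGHEST_OCCUPIED = 'highest occupied level'
-- _PW_HIGHEST_OCCUPIED_LOWEST_FREE = 'highest occupied, lowest unoccupied level'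
-- _PW_KPTS = 'number of k points='
-- _PW_BANDS = _PW_END
-- _PW_BANDSTRUCTURE = 'End of band structure calculation'
--
-- _IDENTIFIERS = (
--     _PW_START,
--     _PW_END,
--     _PW_CELL,
--     _PW_POS,
--     _PW_MAGMOM,
--     _PW_FORCE,
--     _PW_TOTEN,
--     _PW_STRESS,
--     _PW_FERMI,
--     _PW_HIGHEST_OCCUPIED,
--     _PW_HIGHEST_OCCUPIED_LOWEST_FREE,
--     _PW_KPTS,
--     _PW_BANDS,
--     _PW_BANDSTRUCTURE,
-- )
--
--
-- def get_indexes(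
--     pwo_lines,
-- ) -> dict:
--     """Per-identifier scan: one dict comprehension, each value gathered by its
--     own pass over the lines (duplicate _PW_BANDS key collapses as in a dict)."""
--     return {
--         identifier: [idx for idx, line in enumerate(pwo_lines) if identifier in line]
--         for identifier in _IDENTIFIERS
--     }
-- ===== Notes on version B (the rewrite author's own statement) =====
-- stated objective: idiomatic
-- what changed: A makes one combined sweep over the lines, mutating a pre-built dict of empty buckets key by key; B builds the result directly as a dict comprehension in which each identifier gets its own independent enumerate-filter pass over the lines, so no mutable bucket state exists.
import Mathlib
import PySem

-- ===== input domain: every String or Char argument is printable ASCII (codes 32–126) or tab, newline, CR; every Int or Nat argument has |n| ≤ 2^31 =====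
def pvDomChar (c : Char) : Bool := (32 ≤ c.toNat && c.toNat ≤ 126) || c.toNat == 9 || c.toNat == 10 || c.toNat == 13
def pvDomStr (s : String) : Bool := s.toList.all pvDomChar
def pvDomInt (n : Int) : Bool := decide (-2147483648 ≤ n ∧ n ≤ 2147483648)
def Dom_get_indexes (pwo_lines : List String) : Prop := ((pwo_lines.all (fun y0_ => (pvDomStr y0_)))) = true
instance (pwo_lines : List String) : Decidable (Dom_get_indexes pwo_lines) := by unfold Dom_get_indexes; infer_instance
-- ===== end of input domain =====

-- B replaces A's single mutating sweep with an independent per-identifier scan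
-- (a dict comprehension); objective: idiomatic. Return values proved equal.

-- ===== PORT A =====
def get_indexes (pwo_lines : List String) : List (String × List Int) :=
  let indexes : PySem.Dict String (List Int) :=
    (((((((((((((PySem.Dict.empty.insert "Program PWSCF" []).insert
      "End of self-consistent calculation" []).insert
      "CELL_PARAMETERS" []).insert
      "ATOMIC_POSITIONS" []).insert
      "Magnetic moment per site" []).insert
      "Forces acting on atoms" []).insert
      "!    total energy" []).insert
      "total   stress" []).insert
      "the Fermi energy is" []).insert
      "highest occupied level" []).insert
      "highest occupied, lowest unoccupied level" []).insert
      "number of k points=" []).insert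
      "End of self-consistent calculation" []).insert
      "End of band structure calculation" []
  ((PySem.List.enumerate pwo_lines).foldl
    (fun d p =>
      d.keys.foldl
        (fun d' identifier =>
          if PySem.Str.isIn identifier p.2 then
            d'.modify identifier [] (fun v => v ++ [p.1])
          else d')
        d)
    indexes).items

-- ===== PORT B =====
def pwIdentifiers : List String :=
  ["Program PWSCF",
   "End of self-consistent calculation",
   "CELL_PARAMETERS",
   "ATOMIC_POSITIONS",
   "Magnetic moment per site",
   "Forces acting on atoms",
   "!    total energy",
   "total   stress",
   "the Fermi energy is",
   "highest occupied level",
   "highest occupied, lowest unoccupied level",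
   "number of k points=",
   "End of self-consistent calculation",
   "End of band structure calculation"]

def get_indexes_alt (pwo_lines : List String) : List (String × List Int) :=
  (pwIdentifiers.foldl
    (fun d identifier =>
      d.insert identifier
        (((PySem.List.enumerate pwo_lines).filter
            (fun p => PySem.Str.isIn identifier p.2)).map (·.1)))
    PySem.Dict.empty).items

-- ===== PRECONDITION & SPEC =====
def Spec_get_indexes (pwo_lines : List String) (out : List (String × List Int)) : Prop := out = get_indexes_alt pwo_lines
instance (pwo_lines : List String) (out : List (String × List Int)) : Decidable (Spec_get_indexes pwo_lines out) := by unfold Spec_get_indexes; infer_instance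

-- ===== CLAIM (what is proved, stated in full; the proofs are below) =====
def Claim_equal_get_indexes : Prop := ∀ (pwo_lines : List String), Dom_get_indexes pwo_lines → Spec_get_indexes pwo_lines (get_indexes pwo_lines)

-- ===== LEMMAS AND PROOFS =====

-- the deduplicated key list both dicts end up with
def pvK : List String :=
  ["Program PWSCF",
   "End of self-consistent calculation",
   "CELL_PARAMETERS",
   "ATOMIC_POSITIONS",
   "Magnetic moment per site",
   "Forces acting on atoms",
   "!    total energy",
   "total   stress",
   "the Fermi energy is",
   "highest occupied level",
   "highest occupied, lowest unoccupied level",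
   "number of k points=",
   "End of band structure calculation"]

def pvHits (pwo_lines : List String) (k : String) : List Int :=
  ((PySem.List.enumerate pwo_lines).filter
      (fun p => PySem.Str.isIn k p.2)).map (·.1)

-- one line-step of A's sweep
def pvAstep (d : PySem.Dict String (List Int)) (p : Int × String) : PySem.Dict String (List Int) :=
  d.keys.foldl
    (fun d' identifier =>
      if PySem.Str.isIn identifier p.2 then
        d'.modify identifier [] (fun v => v ++ [p.1])
      else d')
    d

def pvD0 : PySem.Dict String (List Int) :=
  ((((((((((((((PySem.Dict.empty.insert "Program PWSCF" []).insert
      "End of self-consistent calculation" []).insert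
      "CELL_PARAMETERS" []).insert
      "ATOMIC_POSITIONS" []).insert
      "Magnetic moment per site" []).insert
      "Forces acting on atoms" []).insert
      "!    total energy" []).insert
      "total   stress" []).insert
      "the Fermi energy is" []).insert
      "highest occupied level" []).insert
      "highest occupied, lowest unoccupied level" []).insert
      "number of k points=" []).insert
      "End of self-consistent calculation" []).insert
      "End of band structure calculation" [])

theorem pv_inner_keys (p : Int × String) (l : List String) (d : PySem.Dict String (List Int))
    (h : ∀ x ∈ l, x ∈ d.keys) :
    (l.foldl
      (fun d' identifier =>
        if PySem.Str.isIn identifier p.2 then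
          d'.modify identifier [] (fun v => v ++ [p.1])
        else d')
      d).keys = d.keys := by
  induction l generalizing d with
  | nil => rfl
  | cons x xs ih =>
    have hx : x ∈ d.keys := h x (by simp)
    have hstep : (if PySem.Str.isIn x p.2 then
        d.modify x [] (fun v => v ++ [p.1]) else d).keys = d.keys := by
      split
      · rw [PySem.Dict.keys_modify]
        exact PySem.Dict.keys_insert_of_contains _ _ ((PySem.Dict.contains_iff_mem_keys d x).mpr hx)
      · rfl
    simp only [List.foldl_cons]
    rw [ih _ (by intro y hy; rw [hstep]; exact h y (by simp [hy])), hstep]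

theorem pv_inner_getD_not_mem (p : Int × String) (k : String) (l : List String)
    (d : PySem.Dict String (List Int)) (hk : k ∉ l) :
    (l.foldl
      (fun d' identifier =>
        if PySem.Str.isIn identifier p.2 then
          d'.modify identifier [] (fun v => v ++ [p.1])
        else d')
      d).getD k [] = d.getD k [] := by
  induction l generalizing d with
  | nil => rfl
  | cons x xs ih =>
    simp only [List.foldl_cons]
    rw [ih _ (fun h => hk (by simp [h]))]
    split
    · exact PySem.Dict.getD_modify_of_ne d [] _ (fun h => hk (by simp [h]))
    · rfl

theorem pv_inner_getD_mem (p : Int × String) (k : String) (l : List String)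
    (d : PySem.Dict String (List Int)) (hnd : l.Nodup) (hk : k ∈ l) :
    (l.foldl
      (fun d' identifier =>
        if PySem.Str.isIn identifier p.2 then
          d'.modify identifier [] (fun v => v ++ [p.1])
        else d')
      d).getD k [] =
      (if PySem.Str.isIn k p.2 then d.getD k [] ++ [p.1] else d.getD k []) := by
  induction l generalizing d with
  | nil => cases hk
  | cons x xs ih =>
    simp only [List.foldl_cons]
    rcases List.mem_cons.mp hk with rfl | hk'
    · have hnot : k ∉ xs := (List.nodup_cons.mp hnd).1
      rw [pv_inner_getD_not_mem p k xs _ hnot]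
      split
      · exact PySem.Dict.getD_modify_self d k [] _
      · rfl
    · have hne : k ≠ x := by
        rintro rfl; exact (List.nodup_cons.mp hnd).1 hk'
      rw [ih _ (List.nodup_cons.mp hnd).2 hk']
      have : (if PySem.Str.isIn x p.2 then
          d.modify x [] (fun v => v ++ [p.1]) else d).getD k [] = d.getD k [] := by
        split
        · exact PySem.Dict.getD_modify_of_ne d [] _ hne
        · rfl
      rw [this]

theorem pv_outer (plist : List (Int × String)) (d : PySem.Dict String (List Int))
    (hkeys : d.keys = pvK) :
    (plist.foldl pvAstep d).keys = pvK ∧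
      ∀ k ∈ pvK, (plist.foldl pvAstep d).getD k [] =
        d.getD k [] ++ ((plist.filter (fun p => PySem.Str.isIn k p.2)).map (·.1)) := by
  induction plist generalizing d with
  | nil => exact ⟨hkeys, fun k _ => by simp⟩
  | cons p ps ih =>
    have hstepkeys : (pvAstep d p).keys = pvK := by
      unfold pvAstep
      rw [pv_inner_keys p d.keys d (fun x hx => hx), hkeys]
    obtain ⟨h1, h2⟩ := ih (pvAstep d p) hstepkeys
    refine ⟨by simpa using h1, fun k hk => ?_⟩
    simp only [List.foldl_cons]
    rw [h2 k hk]
    have hstep : (pvAstep d p).getD k [] =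
        (if PySem.Str.isIn k p.2 then d.getD k [] ++ [p.1] else d.getD k []) := by
      unfold pvAstep
      refine pv_inner_getD_mem p k d.keys d ?_ (by rw [hkeys]; exact hk)
      rw [hkeys]; decide
    rw [hstep, List.filter_cons]
    split
    · simp
    · simp

theorem pv_getD_foldl_insert_of_not_mem (v : String → List Int) (k : String)
    (l : List String) (d : PySem.Dict String (List Int)) (hk : k ∉ l) :
    (l.foldl (fun d x => d.insert x (v x)) d).getD k [] = d.getD k [] := by
  induction l generalizing d with
  | nil => rfl
  | cons x xs ih =>
    simp only [List.foldl_cons]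
    rw [ih _ (fun h => hk (by simp [h]))]
    exact PySem.Dict.getD_insert_of_ne d _ _ (fun h => hk (by simp [h]))

theorem pv_getD_foldl_insert (v : String → List Int) (k : String)
    (l : List String) (d : PySem.Dict String (List Int)) (hk : k ∈ l) :
    (l.foldl (fun d x => d.insert x (v x)) d).getD k [] = v k := by
  induction l generalizing d with
  | nil => cases hk
  | cons x xs ih =>
    simp only [List.foldl_cons]
    by_cases hx : k ∈ xs
    · exact ih _ hx
    · rcases List.mem_cons.mp hk with rfl | h
      · rw [pv_getD_foldl_insert_of_not_mem v k xs _ hx]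
        exact PySem.Dict.getD_insert_self d k _ []
      · exact absurd h hx

theorem pv_A_eq (pwo_lines : List String) :
    get_indexes pwo_lines = pvK.map (fun k => (k, pvHits pwo_lines k)) := by
  show ((PySem.List.enumerate pwo_lines).foldl pvAstep pvD0).items =
    pvK.map (fun k => (k, pvHits pwo_lines k))
  obtain ⟨hkeys, hgetD⟩ := pv_outer (PySem.List.enumerate pwo_lines) pvD0 (by decide)
  rw [PySem.Dict.items_eq_map_keys _ (by rw [hkeys]; decide) [], hkeys]
  refine List.map_congr_left (fun k hk => ?_)
  rw [hgetD k hk]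
  have hinit : ∀ k ∈ pvK, pvD0.getD k ([] : List Int) = [] := by decide
  rw [hinit k hk]
  rfl

theorem pv_B_eq (pwo_lines : List String) :
    get_indexes_alt pwo_lines = pvK.map (fun k => (k, pvHits pwo_lines k)) := by
  unfold get_indexes_alt
  have hkeys : (pwIdentifiers.foldl
      (fun d identifier =>
        d.insert identifier
          (((PySem.List.enumerate pwo_lines).filter
              (fun p => PySem.Str.isIn identifier p.2)).map (·.1)))
      PySem.Dict.empty).keys = pvK := by
    rw [PySem.Dict.keys_foldl_insert pwIdentifiers
      (fun _ identifier => (((PySem.List.enumerate pwo_lines).filter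
          (fun p => PySem.Str.isIn identifier p.2)).map (·.1))) PySem.Dict.empty]
    decide
  rw [PySem.Dict.items_eq_map_keys _ (by rw [hkeys]; decide) [], hkeys]
  refine List.map_congr_left (fun k hk => ?_)
  have hmem : k ∈ pwIdentifiers := by
    have : ∀ x ∈ pvK, x ∈ pwIdentifiers := by decide
    exact this k hk
  rw [pv_getD_foldl_insert
    (fun identifier => (((PySem.List.enumerate pwo_lines).filter
        (fun p => PySem.Str.isIn identifier p.2)).map (·.1))) k pwIdentifiers _ hmem]
  rfl

-- ===== VERDICT (by name: the statement is the Claim_ definition above) =====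
theorem get_indexes_spec : Claim_equal_get_indexes := by
  intro pwo_lines _
  unfold Spec_get_indexes
  rw [pv_A_eq, pv_B_eq]
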